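-- pv_equiv track=rewrite | github.com/integralhero/diarybot | python/topic_test.py | tallyTopics
-- ===== SOURCE A (Python) =====
-- from collections import Counter
-- from collections import defaultdict
--
-- def tallyTopics(listOfSents, topicsDict):
-- 	result = defaultdict(lambda: Counter())
-- 	for sent in listOfSents:
-- 		for token in sent:
-- 			for key in topicsDict:
-- 				for word in topicsDict[key]:
-- 					if token == word: result[key][word] += 1
-- 	return result
-- ===== SOURCE B (Python) =====
-- from collections import Counter
-- from collections import defaultdict
--
-- def tallyTopics(listOfSents, topicsDict):
-- 	index = {}
-- 	for key in topicsDict: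
-- 		for word in topicsDict[key]:
-- 			index.setdefault(word, []).append(key)
-- 	result = defaultdict(lambda: Counter())
-- 	for sent in listOfSents:
-- 		for token in sent:
-- 			for key in index.get(token, ()):
-- 				result[key][token] += 1
-- 	return result
-- ===== Notes on version B (the rewrite author's own statement) =====
-- stated objective: faster
-- what changed: B builds a word->keys index once (setdefault/append) and then does a single dict lookup per token, replacing A's scan over every topic key and word list for every token.
import Mathlib
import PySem

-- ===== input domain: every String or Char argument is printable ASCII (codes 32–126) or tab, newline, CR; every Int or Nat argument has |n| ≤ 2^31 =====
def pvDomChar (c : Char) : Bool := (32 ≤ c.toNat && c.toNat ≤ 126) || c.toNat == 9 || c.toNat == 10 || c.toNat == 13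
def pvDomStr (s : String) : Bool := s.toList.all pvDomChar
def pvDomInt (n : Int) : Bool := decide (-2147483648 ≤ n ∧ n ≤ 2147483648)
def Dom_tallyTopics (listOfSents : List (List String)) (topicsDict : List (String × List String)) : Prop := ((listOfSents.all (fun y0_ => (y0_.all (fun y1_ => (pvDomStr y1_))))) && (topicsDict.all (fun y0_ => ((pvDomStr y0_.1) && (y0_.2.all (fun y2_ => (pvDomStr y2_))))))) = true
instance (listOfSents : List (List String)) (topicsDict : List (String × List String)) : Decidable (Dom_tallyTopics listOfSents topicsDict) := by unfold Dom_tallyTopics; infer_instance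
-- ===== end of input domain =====

-- B replaces A's per-token scan over every topic's word list by a word→keys index built once,
-- so each token does one dictionary lookup (objective: faster, asymptotically fewer comparisons).
-- Python dict iteration + lookup ('for key in topicsDict: … topicsDict[key]') is ported as
-- iteration over the association-list pairs, exact for Python dicts (unique keys).

-- ===== PORT A =====
-- result[key][word] += 1  (defaultdict(Counter): missing outer key → empty Counter, missing word → 0)
def pvBump (d : PySem.Dict String (PySem.Dict String Int)) (key word : String) :
    PySem.Dict String (PySem.Dict String Int) :=
  d.modify key PySem.Dict.empty (fun c => c.modify word 0 (· + 1))

def tallyTopics (listOfSents : List (List String)) (topicsDict : List (String × List String)) : List (String × List (String × Int)) :=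
  (listOfSents.foldl (fun d sent =>
      sent.foldl (fun d token =>
        topicsDict.foldl (fun d kv =>
          kv.2.foldl (fun d word =>
            if token == word then pvBump d kv.1 word else d) d) d) d)
    PySem.Dict.empty).items.map (fun p => (p.1, p.2.items))

-- ===== PORT B =====
-- index.setdefault(word, []).append(key), i.e. index[word] = index.get(word, []) + [key]
def pvIndex (topicsDict : List (String × List String)) : PySem.Dict String (List String) :=
  topicsDict.foldl (fun ix kv =>
    kv.2.foldl (fun ix word => ix.modify word [] (· ++ [kv.1])) ix) PySem.Dict.empty

def tallyTopics_alt (listOfSents : List (List String)) (topicsDict : List (String × List String)) : List (String × List (String × Int)) :=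
  (listOfSents.foldl (fun d sent =>
      sent.foldl (fun d token =>
        ((pvIndex topicsDict).getD token []).foldl (fun d key => pvBump d key token) d) d)
    PySem.Dict.empty).items.map (fun p => (p.1, p.2.items))

-- ===== PRECONDITION & SPEC =====
def Spec_tallyTopics (listOfSents : List (List String)) (topicsDict : List (String × List String)) (out : List (String × List (String × Int))) : Prop := out = tallyTopics_alt listOfSents topicsDict
instance (listOfSents : List (List String)) (topicsDict : List (String × List String)) (out : List (String × List (String × Int))) : Decidable (Spec_tallyTopics listOfSents topicsDict out) := by unfold Spec_tallyTopics; infer_instance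

-- ===== CLAIM (what is proved, stated in full; the proofs are below) =====
def Claim_equal_tallyTopics : Prop := ∀ (listOfSents : List (List String)) (topicsDict : List (String × List String)), Dom_tallyTopics listOfSents topicsDict → Spec_tallyTopics listOfSents topicsDict (tallyTopics listOfSents topicsDict)

-- ===== LEMMAS AND PROOFS =====

-- the key occurrences a token tok produces, in A's (and B's) increment order
def pvOccs (topicsDict : List (String × List String)) (tok : String) : List String :=
  topicsDict.flatMap (fun kv => (kv.2.filter (fun w => w == tok)).map (fun _ => kv.1))

theorem pvIndex_getD (topicsDict : List (String × List String)) (tok : String) :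
    (pvIndex topicsDict).getD tok [] = pvOccs topicsDict tok := by
  have h : ∀ (td : List (String × List String)) (ix : PySem.Dict String (List String)),
      (td.foldl (fun ix kv =>
        kv.2.foldl (fun ix word => ix.modify word [] (· ++ [kv.1])) ix) ix).getD tok []
      = ix.getD tok [] ++ pvOccs td tok := by
    intro td
    induction td with
    | nil => intro ix; simp [pvOccs]
    | cons kv rest ih =>
      intro ix
      rw [List.foldl_cons, ih]
      have hinner : (kv.2.foldl (fun ix word => ix.modify word [] (· ++ [kv.1])) ix).getD tok []
          = ix.getD tok [] ++ (kv.2.filter (fun w => w == tok)).map (fun _ => kv.1) := by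
        have := PySem.Dict.getD_foldl_modify_append
          (l := kv.2.map (fun w => (w, kv.1))) (d := ix) (c := tok)
        simpa only [List.foldl_map, List.filter_map, List.map_map, Function.comp] using this
      rw [hinner]
      simp only [pvOccs, List.flatMap_cons, List.append_assoc]
  have := h topicsDict PySem.Dict.empty
  simpa [pvIndex] using this

theorem inner_word_fold (tok k : String) (ws : List String)
    (d : PySem.Dict String (PySem.Dict String Int)) :
    ws.foldl (fun d word => if tok == word then pvBump d k word else d) d
      = ((ws.filter (fun w => w == tok)).map (fun _ => k)).foldl
          (fun d key => pvBump d key tok) d := by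
  induction ws generalizing d with
  | nil => rfl
  | cons w rest ih =>
    by_cases hw : w = tok
    · subst hw
      rw [List.foldl_cons, if_pos (by simp), List.filter_cons_of_pos (by simp),
          List.map_cons, List.foldl_cons]
      exact ih _
    · rw [List.foldl_cons, if_neg (by simpa using Ne.symm hw),
          List.filter_cons_of_neg (by simpa using hw)]
      exact ih _

theorem a_token_fold (topicsDict : List (String × List String)) (tok : String)
    (d : PySem.Dict String (PySem.Dict String Int)) :
    topicsDict.foldl (fun d kv =>
        kv.2.foldl (fun d word => if tok == word then pvBump d kv.1 word else d) d) d
      = (pvOccs topicsDict tok).foldl (fun d key => pvBump d key tok) d := by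
  induction topicsDict generalizing d with
  | nil => rfl
  | cons kv rest ih =>
    rw [List.foldl_cons, inner_word_fold, ih]
    simp only [pvOccs, List.flatMap_cons, List.foldl_append]

theorem token_step_eq (topicsDict : List (String × List String)) (tok : String)
    (d : PySem.Dict String (PySem.Dict String Int)) :
    topicsDict.foldl (fun d kv =>
        kv.2.foldl (fun d word => if tok == word then pvBump d kv.1 word else d) d) d
      = ((pvIndex topicsDict).getD tok []).foldl (fun d key => pvBump d key tok) d := by
  rw [pvIndex_getD, a_token_fold]

-- ===== VERDICT (by name: the statement is the Claim_ definition above) =====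
theorem tallyTopics_spec : Claim_equal_tallyTopics := by
  intro listOfSents topicsDict _
  unfold Spec_tallyTopics tallyTopics tallyTopics_alt
  have h : (fun (d : PySem.Dict String (PySem.Dict String Int)) (token : String) =>
        topicsDict.foldl (fun d kv =>
          kv.2.foldl (fun d word => if token == word then pvBump d kv.1 word else d) d) d)
      = (fun d token =>
          ((pvIndex topicsDict).getD token []).foldl (fun d key => pvBump d key token) d) := by
    funext d token
    exact token_step_eq topicsDict token d
  rw [h]
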